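-- pv_equiv track=rewrite | github.com/oscarpe979/project_q | backend/app/config/venue_rules.py | get_source_venues
-- ===== SOURCE A (Python) =====
-- from typing import Dict, List, Any
--
-- CROSS_VENUE_POLICIES: Dict[tuple, Dict[str, Any]] = {
--     # ───────────────────────────────────────────────────────────────────────────
--     # Wonder of the Seas (WN) - Studio B imports
--     # ───────────────────────────────────────────────────────────────────────────
--     ("WN", "Studio B", "AquaTheater"): {
--         "highlight_inclusions": ["show", "headliner", "movie", "game", "backup"],
--         "custom_instructions": "For any movie related events, simplify the name to just Movie",
--     },
--     ("WN", "Studio B", "Royal Theater"): {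
--         "highlight_inclusions": ["show", "headliner", "comedy", "game", "movie"],
--         "custom_instructions": "For any movie related events, simplify the name to just Movie",
--     },
--     ("WN", "Studio B", "Royal Promenade"): {
--         "highlight_inclusions": ["party", "parade", "competition", "show", "class", "activity"],
--         "merge_inclusions": ["Anchors Aweigh Parade"],
--         "custom_instructions": (
--             "Extract ALL Parades, Street Parties, and Theme Activities like 'Thriller Dance Class'."
--         ),
--     },
--
--     # ───────────────────────────────────────────────────────────────────────────
--     # Wonder of the Seas (WN) - Royal Theater imports
--     # ───────────────────────────────────────────────────────────────────────────
--     ("WN", "Royal Theater", "AquaTheater"): {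
--         "highlight_inclusions": ["show", "headliner", "movie", "game", "backup"],
--         "custom_instructions": "For any movie related events, simplify the name to just Movie",
--     },
--     ("WN", "Royal Theater", "Studio B"): {
--         "highlight_inclusions": ["show", "headliner", "comedy", "game", "movie"],
--         "custom_instructions": ""
--     },
--     ("WN", "Royal Theater", "Royal Promenade"): {
--         "highlight_inclusions": ["party", "parade", "competition", "show", "class", "activity"],
--         "merge_inclusions": ["Anchors Aweigh Parade"],
--         "custom_instructions": (
--             "Extract ALL Parades, Street Parties, and Theme Activities like 'Thriller Dance Class'."
--         ),
--     },
--
--     # ───────────────────────────────────────────────────────────────────────────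
--     # Wonder of the Seas (WN) - AquaTheater imports
--     # ───────────────────────────────────────────────────────────────────────────
--     ("WN", "AquaTheater", "Royal Theater"): {
--         "highlight_inclusions": ["show", "headliner", "movie", "game"],
--         "custom_instructions": "For any movie related events, simplify the name to just Movie",
--     },
--     ("WN", "AquaTheater", "Studio B"): {
--         "highlight_inclusions": ["show", "headliner", "comedy", "game", "movie"],
--         "custom_instructions": ""
--     },
--     ("WN", "AquaTheater", "Royal Promenade"): {
--         "highlight_inclusions": ["party", "parade", "competition", "show", "class", "activity"],
--         "merge_inclusions": ["Anchors Aweigh Parade"],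
--         "custom_instructions": (
--             "Extract ALL Parades, Street Parties, and Theme Activities like 'Thriller Dance Class'."
--         ),
--     },
--
--     # ───────────────────────────────────────────────────────────────────────────
--     # Add more ships/venues as needed...
--     # ───────────────────────────────────────────────────────────────────────────
-- }
--
-- def get_source_venues(ship_code: str, target_venue: str) -> List[str]:
--     """
--     Extract source venues by scanning CROSS_VENUE_POLICIES for entries
--     matching (ship_code, target_venue, *).
--     """
--     if not ship_code:
--         return []
--     return [
--         key[2]  # The third element is source_venue
--         for key in CROSS_VENUE_POLICIES.keys()
--         if key[0] == ship_code and key[1] == target_venue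
--     ]
-- ===== SOURCE B (Python) =====
-- from typing import Dict, List, Any
--
-- CROSS_VENUE_POLICIES: Dict[tuple, Dict[str, Any]] = {
--     ("WN", "Studio B", "AquaTheater"): {},
--     ("WN", "Studio B", "Royal Theater"): {},
--     ("WN", "Studio B", "Royal Promenade"): {},
--     ("WN", "Royal Theater", "AquaTheater"): {},
--     ("WN", "Royal Theater", "Studio B"): {},
--     ("WN", "Royal Theater", "Royal Promenade"): {},
--     ("WN", "AquaTheater", "Royal Theater"): {},
--     ("WN", "AquaTheater", "Studio B"): {},
--     ("WN", "AquaTheater", "Royal Promenade"): {},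
-- }
--
-- # Built once at import time: (ship, target) -> list of source venues, in insertion order.
-- _INDEX: Dict[tuple, List[str]] = {}
-- for _key in CROSS_VENUE_POLICIES:
--     _INDEX.setdefault((_key[0], _key[1]), []).append(_key[2])
--
-- def get_source_venues(ship_code: str, target_venue: str) -> List[str]:
--     if not ship_code:
--         return []
--     return list(_INDEX.get((ship_code, target_venue), []))
-- ===== Notes on version B (the rewrite author's own statement) =====
-- stated objective: faster
-- what changed: Replaces the per-call linear scan-and-filter over CROSS_VENUE_POLICIES with a (ship, target)->sources index dict built once at import time; each call is a single O(1) dict lookup returning a fresh list copy.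
import Mathlib
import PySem

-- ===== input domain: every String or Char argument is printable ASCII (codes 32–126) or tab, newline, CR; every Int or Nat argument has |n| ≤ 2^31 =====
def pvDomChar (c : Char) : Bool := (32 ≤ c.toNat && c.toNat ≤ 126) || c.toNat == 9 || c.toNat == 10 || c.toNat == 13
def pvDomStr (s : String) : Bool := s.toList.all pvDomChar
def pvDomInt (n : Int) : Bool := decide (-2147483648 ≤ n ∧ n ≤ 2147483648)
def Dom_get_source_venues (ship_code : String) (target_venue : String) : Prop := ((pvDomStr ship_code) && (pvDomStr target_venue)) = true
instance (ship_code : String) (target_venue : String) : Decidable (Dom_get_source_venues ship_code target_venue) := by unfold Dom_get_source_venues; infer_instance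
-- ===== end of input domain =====

-- B builds a (ship, target) → sources index once and answers each call by one lookup
-- returning a fresh list, instead of A's per-call scan-and-filter over all policy keys.

-- ===== PORT A =====
-- keys of CROSS_VENUE_POLICIES, in insertion order (values are never read by the function)
def pvPolicyKeys : List (String × String × String) :=
  [ ("WN", "Studio B", "AquaTheater"),
    ("WN", "Studio B", "Royal Theater"),
    ("WN", "Studio B", "Royal Promenade"),
    ("WN", "Royal Theater", "AquaTheater"),
    ("WN", "Royal Theater", "Studio B"),
    ("WN", "Royal Theater", "Royal Promenade"),
    ("WN", "AquaTheater", "Royal Theater"),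
    ("WN", "AquaTheater", "Studio B"),
    ("WN", "AquaTheater", "Royal Promenade") ]

def get_source_venues (ship_code : String) (target_venue : String) : List String :=
  if ship_code = "" then []
  else ((pvPolicyKeys.filter (fun k => k.1 == ship_code && k.2.1 == target_venue)).map (fun k => k.2.2))

-- ===== PORT B =====
-- _INDEX built once: for key in keys: _INDEX.setdefault((key[0], key[1]), []).append(key[2])
def pvIndex : PySem.Dict (String × String) (List String) :=
  pvPolicyKeys.foldl (fun d k => d.modify (k.1, k.2.1) [] (· ++ [k.2.2])) PySem.Dict.empty

def get_source_venues_alt (ship_code : String) (target_venue : String) : List String :=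
  if ship_code = "" then []
  else (pvIndex.get? (ship_code, target_venue)).getD []

-- ===== PRECONDITION & SPEC =====
def Spec_get_source_venues (ship_code : String) (target_venue : String) (out : List String) : Prop := out = get_source_venues_alt ship_code target_venue
instance (ship_code : String) (target_venue : String) (out : List String) : Decidable (Spec_get_source_venues ship_code target_venue out) := by unfold Spec_get_source_venues; infer_instance

-- ===== CLAIM (what is proved, stated in full; the proofs are below) =====
def Claim_equal_get_source_venues : Prop := ∀ (ship_code : String) (target_venue : String), Dom_get_source_venues ship_code target_venue → Spec_get_source_venues ship_code target_venue (get_source_venues ship_code target_venue)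

-- ===== LEMMAS AND PROOFS =====
-- the index, evaluated
lemma pvIndex_eq : pvIndex = PySem.Dict.mk
    [ (("WN", "Studio B"), ["AquaTheater", "Royal Theater", "Royal Promenade"]),
      (("WN", "Royal Theater"), ["AquaTheater", "Studio B", "Royal Promenade"]),
      (("WN", "AquaTheater"), ["Royal Theater", "Studio B", "Royal Promenade"]) ] := by
  decide

-- ===== VERDICT (by name: the statement is the Claim_ definition above) =====
theorem get_source_venues_spec : Claim_equal_get_source_venues := by
  intro s t _
  unfold Spec_get_source_venues get_source_venues get_source_venues_alt
  by_cases hs : s = ""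
  · simp [hs]
  · simp only [hs, if_false, pvIndex_eq]
    by_cases hw : s = "WN"
    · subst hw
      by_cases h1 : t = "Studio B"
      · subst h1; decide
      · by_cases h2 : t = "Royal Theater"
        · subst h2; decide
        · by_cases h3 : t = "AquaTheater"
          · subst h3; decide
          · simp [pvPolicyKeys, PySem.Dict.get?,
                  Ne.symm h1, Ne.symm h2, Ne.symm h3]
    · simp [pvPolicyKeys, PySem.Dict.get?, Ne.symm hw]
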